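-- pv_equiv track=rewrite | github.com/yingsanyi/lerobotPro | examples/songling_aloha/record_compat.py | _get_last_flag_value
-- ===== SOURCE A (Python) =====
-- def _get_last_flag_value(args: list[str], names: tuple[str, ...]) -> str | None:
--     value: str | None = None
--     i = 0
--     while i < len(args):
--         arg = args[i]
--         matched_name = next((name for name in names if arg == name or arg.startswith(f"{name}=")), None)
--         if matched_name is None:
--             i += 1
--             continue
--         if arg == matched_name:
--             if i + 1 < len(args) and not args[i + 1].startswith("--"):
--                 value = args[i + 1]
--                 i += 2
--             else:
--                 raise ValueError(f"Missing value after {matched_name}.")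
--             continue
--         value = arg.split("=", 1)[1]
--         i += 1
--     return value
-- ===== SOURCE B (Python) =====
-- def _get_last_flag_value(args, names):
--     value = None
--     pending = None
--     for tok in args:
--         if pending is not None:
--             if tok.startswith("--"):
--                 raise ValueError(f"Missing value after {pending}.")
--             value = tok
--             pending = None
--             continue
--         matched = next((name for name in names if tok == name or tok.startswith(f"{name}=")), None)
--         if matched is None:
--             continue
--         if tok == matched:
--             pending = matched
--         else:
--             value = tok.split("=", 1)[1]
--     if pending is not None:
--         raise ValueError(f"Missing value after {pending}.")
--     return value
-- ===== Notes on version B (the rewrite author's own statement) =====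
-- stated objective: alternative
-- what changed: Replaces A's while-loop with index arithmetic and i+1 look-ahead by a single forward for-loop state machine carrying a 'pending' flag name awaiting its value.
import Mathlib
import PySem

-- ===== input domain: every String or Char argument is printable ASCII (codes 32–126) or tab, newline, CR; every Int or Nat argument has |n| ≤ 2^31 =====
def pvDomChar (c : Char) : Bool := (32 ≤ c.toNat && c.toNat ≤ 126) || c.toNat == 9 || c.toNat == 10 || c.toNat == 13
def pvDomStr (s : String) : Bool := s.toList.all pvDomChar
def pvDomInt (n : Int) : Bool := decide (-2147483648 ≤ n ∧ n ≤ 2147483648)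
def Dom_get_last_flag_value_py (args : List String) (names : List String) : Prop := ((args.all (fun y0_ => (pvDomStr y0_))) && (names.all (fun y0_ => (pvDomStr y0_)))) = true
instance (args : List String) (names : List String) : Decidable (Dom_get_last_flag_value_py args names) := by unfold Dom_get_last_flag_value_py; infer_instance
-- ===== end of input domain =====

-- B replaces A's index/look-ahead while-loop with a single forward state machine (pending flag awaiting its value); objective: alternative decomposition, same cost.


-- shared token-level helpers (textually identical in both Python sources):
-- next((name for name in names if arg == name or arg.startswith(f"{name}=")), None)
def pvFindFlagName (arg : String) (names : List String) : Option String :=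
  names.find? (fun name => arg == name || PySem.Str.startswith arg (name ++ "="))

-- arg.split("=", 1)[1]  (none exactly where Python would raise)
def pvSplitAfterEq (arg : String) : Option String :=
  match PySem.Str.splitMax? arg "=" 1 with
  | some (_ :: v :: _) => some v
  | _ => none

-- ===== PORT A =====
-- A's while loop over index i, recursing on the remaining suffix of args;
-- `none` is returned at each `raise ValueError` site (excluded by Pre_).
def pvLoopA (names : List String) : List String → Option String → Option String
  | [], value => value
  | arg :: rest, value =>
    match pvFindFlagName arg names with
    | none => pvLoopA names rest value
    | some m =>
      if arg == m then
        match rest with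
        | next :: rest2 =>
          if PySem.Str.startswith next "--" then none  -- raise ValueError
          else pvLoopA names rest2 (some next)
        | [] => none                                    -- raise ValueError
      else
        match pvSplitAfterEq arg with
        | some v => pvLoopA names rest (some v)
        | none => none                                  -- IndexError (unreachable)

def get_last_flag_value_py (args : List String) (names : List String) : Option String :=
  pvLoopA names args none

-- ===== PORT B =====
-- B's single forward pass with state (pending, value); `none` at each raise site.
def pvLoopB (names : List String) : List String → Option String → Option String → Option String
  | [], pending, value =>
    match pending with
    | some _ => none                                    -- raise ValueError at end
    | none => value
  | tok :: rest, some _, _value =>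
    if PySem.Str.startswith tok "--" then none          -- raise ValueError
    else pvLoopB names rest none (some tok)
  | tok :: rest, none, value =>
    match pvFindFlagName tok names with
    | none => pvLoopB names rest none value
    | some m =>
      if tok == m then pvLoopB names rest (some m) value
      else
        match pvSplitAfterEq tok with
        | some v => pvLoopB names rest none (some v)
        | none => none                                  -- IndexError (unreachable)

def get_last_flag_value_py_alt (args : List String) (names : List String) : Option String :=
  pvLoopB names args none none

-- ===== PRECONDITION & SPEC =====
-- Pre_ excludes exactly the inputs on which Python A raises ValueError: args lists in
-- which some exactly-matched flag token is not followed by a value token (it is last,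
-- or the next token starts with "--"); B raises on exactly the same inputs.  This
-- well-formedness of a flag/value token SEQUENCE is inherently a grammar condition, so
-- it is stated as a shape check over the list: pvOkScan computes NO value and keeps no
-- state — it only checks, token by token, that every flag has its value token.
def pvOkScan (names : List String) : List String → Bool
  | [] => true
  | arg :: rest =>
    match pvFindFlagName arg names with
    | none => pvOkScan names rest
    | some m =>
      if arg == m then
        match rest with
        | next :: rest2 => !(PySem.Str.startswith next "--") && pvOkScan names rest2
        | [] => false
      else pvOkScan names rest

def Pre_get_last_flag_value_py (args : List String) (names : List String) : Prop :=
  pvOkScan names args = true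
instance (args : List String) (names : List String) : Decidable (Pre_get_last_flag_value_py args names) := by unfold Pre_get_last_flag_value_py; infer_instance

def pvWitness_get_last_flag_value_py : List String × List String :=
  (["--a", "1", "--b=2", "x", "--a", "3"], ["--a", "--b"])

def Spec_get_last_flag_value_py (args : List String) (names : List String) (out : Option String) : Prop := out = get_last_flag_value_py_alt args names
instance (args : List String) (names : List String) (out : Option String) : Decidable (Spec_get_last_flag_value_py args names out) := by unfold Spec_get_last_flag_value_py; infer_instance

-- ===== CLAIM (what is proved, stated in full; the proofs are below) =====
def Claim_equal_get_last_flag_value_py : Prop := ∀ (args : List String) (names : List String), Dom_get_last_flag_value_py args names → Pre_get_last_flag_value_py args names → Spec_get_last_flag_value_py args names (get_last_flag_value_py args names)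

-- ===== LEMMAS AND PROOFS =====
lemma pvLoop_eq (names : List String) :
    ∀ (n : Nat) (args : List String) (v : Option String), args.length ≤ n →
      pvOkScan names args = true → pvLoopA names args v = pvLoopB names args none v := by
  intro n
  induction n with
  | zero =>
    intro args v hlen _
    have : args = [] := List.eq_nil_of_length_eq_zero (Nat.le_zero.mp hlen)
    subst this; rfl
  | succ n ih =>
    intro args v hlen hok
    match args with
    | [] => rfl
    | arg :: rest =>
      rw [pvLoopA.eq_def, pvLoopB.eq_def]
      rw [pvOkScan.eq_def] at hok
      dsimp only at hok ⊢
      cases hfm : pvFindFlagName arg names with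
      | none =>
        rw [hfm] at hok
        exact ih rest v (by simp at hlen; omega) hok
      | some m =>
        rw [hfm] at hok
        by_cases heq : (arg == m) = true
        · simp only [heq, if_true] at hok ⊢
          match rest with
          | [] => simp at hok
          | next :: rest2 =>
            simp only [Bool.and_eq_true, Bool.not_eq_true'] at hok
            simp only [pvLoopB, hok.1, Bool.false_eq_true, if_false]
            exact ih rest2 (some next) (by simp at hlen; omega) hok.2
        · simp only [heq] at hok ⊢
          cases hsp : pvSplitAfterEq arg with
          | none => simp
          | some v' =>
            exact ih rest (some v') (by simp at hlen; omega) hok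

-- ===== VERDICT (by name: the statement is the Claim_ definition above) =====
theorem get_last_flag_value_py_spec : Claim_equal_get_last_flag_value_py := by
  intro args names _ hpre
  unfold Spec_get_last_flag_value_py get_last_flag_value_py get_last_flag_value_py_alt
  exact pvLoop_eq names args.length args none le_rfl hpre
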